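-- pv_equiv track=rewrite | github.com/YichengYang-Ethan/QuantPath | tools/scrape_gradcafe.py | map_name_to_program_id
-- ===== SOURCE A (Python) =====
-- PROGRAM_NAME_MAP = {
--     "baruch": "baruch-mfe",
--     "cmu": "cmu-mscf", "mscf": "cmu-mscf", "carnegie": "cmu-mscf",
--     "princeton": "princeton-mfin",
--     "berkeley": "berkeley-mfe",
--     "columbia msfe": "columbia-msfe", "columbia mfe": "columbia-msfe",
--     "columbia mafn": "columbia-mafn", "columbia": "columbia-msfe",
--     "mit": "mit-mfin",
--     "stanford": "stanford-mcf",
--     "uchicago": "uchicago-msfm", "chicago": "uchicago-msfm", "msfm": "uchicago-msfm",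
--     "cornell": "cornell-mfe",
--     "nyu tandon": "nyu-tandon-mfe", "nyu courant": "nyu-courant", "nyu": "nyu-tandon-mfe",
--     "gatech": "gatech-qcf", "georgia tech": "gatech-qcf", "qcf": "gatech-qcf",
--     "rutgers": "rutgers-mqf",
--     "ucla": "ucla-mfe",
--     "uiuc": "uiuc-msfe", "illinois": "uiuc-msfe",
--     "northwestern": "northwestern-mfe",
--     "jhu": "jhu-mfm", "johns hopkins": "jhu-mfm",
--     "nc state": "ncstate-mfm",
--     "fordham": "fordham-msqf",
--     "stevens": "stevens-mfe",
--     "usc": "usc-msmf",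
--     "boston": "bu-msmf",
--     "michigan": "umich-mfe",
--     "minnesota": "uminn-mfm",
--     "toronto": "utoronto-mmf",
-- }
--
-- def map_name_to_program_id(name: str) -> str | None:
--     name_l = name.lower()
--     # 精确匹配
--     for k, v in PROGRAM_NAME_MAP.items():
--         if name_l.startswith(k):
--             return v
--     # 子串匹配
--     for k, v in PROGRAM_NAME_MAP.items():
--         if k in name_l:
--             return v
--     return None
-- ===== SOURCE B (Python) =====
-- # Alternative decomposition: the alias table is a list of "alias|id" rows
-- # parsed once; the match is computed by scoring every alias that occurs in
-- # the name with (prefix?, position) and taking the minimum, instead of A's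
-- # two early-return scans over a dict.
-- PROGRAM_TABLE = [
--     "baruch|baruch-mfe",
--     "cmu|cmu-mscf",
--     "mscf|cmu-mscf",
--     "carnegie|cmu-mscf",
--     "princeton|princeton-mfin",
--     "berkeley|berkeley-mfe",
--     "columbia msfe|columbia-msfe",
--     "columbia mfe|columbia-msfe",
--     "columbia mafn|columbia-mafn",
--     "columbia|columbia-msfe",
--     "mit|mit-mfin",
--     "stanford|stanford-mcf",
--     "uchicago|uchicago-msfm",
--     "chicago|uchicago-msfm",
--     "msfm|uchicago-msfm",
--     "cornell|cornell-mfe",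
--     "nyu tandon|nyu-tandon-mfe",
--     "nyu courant|nyu-courant",
--     "nyu|nyu-tandon-mfe",
--     "gatech|gatech-qcf",
--     "georgia tech|gatech-qcf",
--     "qcf|gatech-qcf",
--     "rutgers|rutgers-mqf",
--     "ucla|ucla-mfe",
--     "uiuc|uiuc-msfe",
--     "illinois|uiuc-msfe",
--     "northwestern|northwestern-mfe",
--     "jhu|jhu-mfm",
--     "johns hopkins|jhu-mfm",
--     "nc state|ncstate-mfm",
--     "fordham|fordham-msqf",
--     "stevens|stevens-mfe",
--     "usc|usc-msmf",
--     "boston|bu-msmf",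
--     "michigan|umich-mfe",
--     "minnesota|uminn-mfm",
--     "toronto|utoronto-mmf"
-- ]
--
--
-- def _parse(line):
--     k, _, v = line.partition("|")
--     return (k, v)
--
--
-- _ENTRIES = [_parse(line) for line in PROGRAM_TABLE]
--
--
-- def map_name_to_program_id(name):
--     name_l = name.lower()
--     scored = [((0 if name_l.startswith(k) else 1, i), v)
--               for i, (k, v) in enumerate(_ENTRIES)
--               if k in name_l]
--     if not scored:
--         return None
--     return min(scored, key=lambda t: t[0])[1]
-- ===== Notes on version B (the rewrite author's own statement) =====
-- stated objective: alternative
-- what changed: B keeps the alias table as a text block parsed once and replaces A's two early-return scans (prefix pass, then substring pass) with a scoring pass: every alias occurring in the lowered name is tagged with (0 if prefix else 1, position) and the minimum-scored entry's id is returned, None if nothing matched.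
import Mathlib
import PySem

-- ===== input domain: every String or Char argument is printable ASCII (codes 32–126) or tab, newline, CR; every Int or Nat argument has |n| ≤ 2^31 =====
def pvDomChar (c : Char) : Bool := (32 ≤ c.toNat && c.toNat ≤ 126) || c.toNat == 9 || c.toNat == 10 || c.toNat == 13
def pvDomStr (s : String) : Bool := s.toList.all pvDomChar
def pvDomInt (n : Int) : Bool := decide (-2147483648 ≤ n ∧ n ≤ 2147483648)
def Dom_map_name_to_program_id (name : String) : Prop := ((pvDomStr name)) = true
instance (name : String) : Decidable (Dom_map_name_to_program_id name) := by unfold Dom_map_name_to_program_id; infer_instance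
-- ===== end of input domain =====

-- B keeps the alias table as a parsed text block and picks the best match by
-- scoring aliases with (prefix?, position) and taking the minimum, instead of
-- A's two early-return scans (alternative decomposition; same result).

-- ===== PORT A =====
-- PROGRAM_NAME_MAP as an insertion-order association list (keys are distinct)
def pvProgramNameMap : List (String × String) :=
  [("baruch", "baruch-mfe"),
   ("cmu", "cmu-mscf"), ("mscf", "cmu-mscf"), ("carnegie", "cmu-mscf"),
   ("princeton", "princeton-mfin"),
   ("berkeley", "berkeley-mfe"),
   ("columbia msfe", "columbia-msfe"), ("columbia mfe", "columbia-msfe"),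
   ("columbia mafn", "columbia-mafn"), ("columbia", "columbia-msfe"),
   ("mit", "mit-mfin"),
   ("stanford", "stanford-mcf"),
   ("uchicago", "uchicago-msfm"), ("chicago", "uchicago-msfm"), ("msfm", "uchicago-msfm"),
   ("cornell", "cornell-mfe"),
   ("nyu tandon", "nyu-tandon-mfe"), ("nyu courant", "nyu-courant"), ("nyu", "nyu-tandon-mfe"),
   ("gatech", "gatech-qcf"), ("georgia tech", "gatech-qcf"), ("qcf", "gatech-qcf"),
   ("rutgers", "rutgers-mqf"),
   ("ucla", "ucla-mfe"),
   ("uiuc", "uiuc-msfe"), ("illinois", "uiuc-msfe"),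
   ("northwestern", "northwestern-mfe"),
   ("jhu", "jhu-mfm"), ("johns hopkins", "jhu-mfm"),
   ("nc state", "ncstate-mfm"),
   ("fordham", "fordham-msqf"),
   ("stevens", "stevens-mfe"),
   ("usc", "usc-msmf"),
   ("boston", "bu-msmf"),
   ("michigan", "umich-mfe"),
   ("minnesota", "uminn-mfm"),
   ("toronto", "utoronto-mmf")]

-- A's first loop: `for k, v in …: if name_l.startswith(k): return v`
def pvLoopPrefix (nameL : String) : List (String × String) → Option String
  | [] => none
  | (k, v) :: rest =>
      if PySem.Str.startswith nameL k then some v else pvLoopPrefix nameL rest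

-- A's second loop: `for k, v in …: if k in name_l: return v`
def pvLoopSub (nameL : String) : List (String × String) → Option String
  | [] => none
  | (k, v) :: rest =>
      if PySem.Str.isIn k nameL then some v else pvLoopSub nameL rest

def map_name_to_program_id (name : String) : Option String :=
  let nameL := PySem.Str.lower name
  match pvLoopPrefix nameL pvProgramNameMap with
  | some v => some v
  | none => pvLoopSub nameL pvProgramNameMap

-- ===== PORT B =====
-- the PROGRAM_TABLE rows of Source B
def pvProgramTable : List String :=
  ["baruch|baruch-mfe",
   "cmu|cmu-mscf",
   "mscf|cmu-mscf",
   "carnegie|cmu-mscf",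
   "princeton|princeton-mfin",
   "berkeley|berkeley-mfe",
   "columbia msfe|columbia-msfe",
   "columbia mfe|columbia-msfe",
   "columbia mafn|columbia-mafn",
   "columbia|columbia-msfe",
   "mit|mit-mfin",
   "stanford|stanford-mcf",
   "uchicago|uchicago-msfm",
   "chicago|uchicago-msfm",
   "msfm|uchicago-msfm",
   "cornell|cornell-mfe",
   "nyu tandon|nyu-tandon-mfe",
   "nyu courant|nyu-courant",
   "nyu|nyu-tandon-mfe",
   "gatech|gatech-qcf",
   "georgia tech|gatech-qcf",
   "qcf|gatech-qcf",
   "rutgers|rutgers-mqf",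
   "ucla|ucla-mfe",
   "uiuc|uiuc-msfe",
   "illinois|uiuc-msfe",
   "northwestern|northwestern-mfe",
   "jhu|jhu-mfm",
   "johns hopkins|jhu-mfm",
   "nc state|ncstate-mfm",
   "fordham|fordham-msqf",
   "stevens|stevens-mfe",
   "usc|usc-msmf",
   "boston|bu-msmf",
   "michigan|umich-mfe",
   "minnesota|uminn-mfm",
   "toronto|utoronto-mmf"]

-- hand port of `line.partition("|")` (keeping pieces 0 and 2): split a char list
-- at the FIRST '|'; exact for this one-character separator (if no '|' occurs,
-- Python returns (line, '', ''), i.e. the whole line and the empty string).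
def pvPartitionBar : List Char → List Char × List Char
  | [] => ([], [])
  | c :: rest =>
      if c = '|' then ([], rest)
      else
        let p := pvPartitionBar rest
        (c :: p.1, p.2)

-- Source B's `_parse`
def pvParse (line : String) : String × String :=
  let p := pvPartitionBar line.toList
  (String.ofList p.1, String.ofList p.2)

-- Source B's `_ENTRIES`
def pvEntries : List (String × String) := pvProgramTable.map pvParse

def map_name_to_program_id_alt (name : String) : Option String :=
  let nameL := PySem.Str.lower name
  let scored := (PySem.List.enumerate pvEntries 0).filterMap (fun iv =>
    if PySem.Str.isIn iv.2.1 nameL then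
      some (((if PySem.Str.startswith nameL iv.2.1 then (0 : Int) else 1), iv.1), iv.2.2)
    else none)
  match PySem.List.min2? scored (fun t => t.1.1) (fun t => t.1.2) with
  | some t => some t.2
  | none => none

-- ===== PRECONDITION & SPEC =====
def Spec_map_name_to_program_id (name : String) (out : Option String) : Prop := out = map_name_to_program_id_alt name
instance (name : String) (out : Option String) : Decidable (Spec_map_name_to_program_id name out) := by unfold Spec_map_name_to_program_id; infer_instance

-- ===== CLAIM (what is proved, stated in full; the proofs are below) =====
def Claim_equal_map_name_to_program_id : Prop := ∀ (name : String), Dom_map_name_to_program_id name → Spec_map_name_to_program_id name (map_name_to_program_id name)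

-- ===== LEMMAS AND PROOFS =====

-- B's table, parsed, is exactly A's association list
set_option maxRecDepth 10000 in
theorem pvEntries_eq : pvEntries = pvProgramNameMap := by decide

-- the scored list of B, as a function of the entry list and the start index
def pvScored (nameL : String) (l : List (String × String)) (s : Int) :
    List ((Int × Int) × String) :=
  (PySem.List.enumerate l s).filterMap (fun iv =>
    if PySem.Str.isIn iv.2.1 nameL then
      some (((if PySem.Str.startswith nameL iv.2.1 then (0 : Int) else 1), iv.1), iv.2.2)
    else none)

-- the fold step of PySem.List.min2? at our key functions
def pvF : Option ((Int × Int) × String) → ((Int × Int) × String) → Option ((Int × Int) × String) :=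
  fun acc x =>
    match acc with
    | none => some x
    | some m =>
        if x.1.1 < m.1.1 ∨ (x.1.1 ≤ m.1.1 ∧ x.1.2 < m.1.2) then some x else some m

theorem min2?_eq_foldl (xs : List ((Int × Int) × String)) :
    PySem.List.min2? xs (fun t => t.1.1) (fun t => t.1.2) = xs.foldl pvF none := by
  simp only [PySem.List.min2?]
  congr 1
  funext acc x
  cases acc with
  | none => rfl
  | some m =>
      have hiff : ((decide (x.1.1 < m.1.1) || !decide (m.1.1 < x.1.1) && decide (x.1.2 < m.1.2)) = true)
          ↔ (x.1.1 < m.1.1 ∨ (x.1.1 ≤ m.1.1 ∧ x.1.2 < m.1.2)) := by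
        simp [not_lt]
      simp only [pvF, hiff]

-- first prefix / substring match of A's loops, tagged with its score
def pvFirstPre (nameL : String) : List (String × String) → Int → Option ((Int × Int) × String)
  | [], _ => none
  | (k, v) :: rest, s =>
      if PySem.Chars.startswith nameL.toList k.toList = true then some ((0, s), v)
      else pvFirstPre nameL rest (s + 1)

def pvFirstSub (nameL : String) : List (String × String) → Int → Option ((Int × Int) × String)
  | [], _ => none
  | (k, v) :: rest, s =>
      if PySem.Chars.isIn k.toList nameL.toList = true then some ((1, s), v)
      else pvFirstSub nameL rest (s + 1)

theorem startswith_isIn (s k : String) (h : PySem.Chars.startswith s.toList k.toList = true) :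
    PySem.Chars.isIn k.toList s.toList = true :=
  (PySem.Chars.isIn_iff_infix _ _).2 ((PySem.Chars.startswith_iff _ _).1 h).isInfix

theorem pvScored_cons (nameL k v : String) (rest : List (String × String)) (s : Int) :
    pvScored nameL ((k, v) :: rest) s =
      if PySem.Chars.isIn k.toList nameL.toList = true then
        (((if PySem.Chars.startswith nameL.toList k.toList = true then (0 : Int) else 1), s), v)
          :: pvScored nameL rest (s + 1)
      else pvScored nameL rest (s + 1) := by
  simp only [pvScored, PySem.List.enumerate_cons, List.filterMap_cons, PySem.Str.isIn_eq,
    PySem.Str.startswith_eq]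
  split_ifs <;> rfl

theorem pvScored_bound (nameL : String) (l : List (String × String)) (s : Int) :
    ∀ y ∈ pvScored nameL l s, (y.1.1 = 0 ∨ y.1.1 = 1) ∧ s ≤ y.1.2 := by
  induction l generalizing s with
  | nil => intro y hy; simp [pvScored] at hy
  | cons kv rest ih =>
      obtain ⟨k, v⟩ := kv
      intro y hy
      rw [pvScored_cons] at hy
      by_cases hin : PySem.Chars.isIn k.toList nameL.toList = true
      · rw [if_pos hin] at hy
        rcases List.mem_cons.1 hy with rfl | hy
        · refine ⟨?_, by simp⟩
          by_cases hsw : PySem.Chars.startswith nameL.toList k.toList = true <;> simp [hsw]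
        · have := ih (s + 1) y hy; exact ⟨this.1, by omega⟩
      · rw [if_neg hin] at hy
        have := ih (s + 1) y hy; exact ⟨this.1, by omega⟩

-- once a minimal candidate is held, the fold keeps it
theorem pvF_keep (xs : List ((Int × Int) × String)) (m : (Int × Int) × String)
    (h : ∀ y ∈ xs, ¬ (y.1.1 < m.1.1 ∨ (y.1.1 ≤ m.1.1 ∧ y.1.2 < m.1.2))) :
    xs.foldl pvF (some m) = some m := by
  induction xs with
  | nil => rfl
  | cons y t ih =>
      have hstep : pvF (some m) y = some m := by
        simp only [pvF]
        rw [if_neg (h y (by simp))]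
      rw [List.foldl_cons, hstep]
      exact ih (fun z hz => h z (by simp [hz]))

-- folding from a tier-1 candidate at index s over a scored tail with larger
-- indices returns the first tier-0 element if any, otherwise the candidate
theorem pvF_tier1 (xs : List ((Int × Int) × String)) (s : Int) (v : String)
    (hbound : ∀ y ∈ xs, (y.1.1 = 0 ∨ y.1.1 = 1) ∧ s < y.1.2)
    (hchain : xs.Pairwise (fun p q => p.1.2 < q.1.2)) :
    xs.foldl pvF (some ((1, s), v)) =
      match xs.find? (fun y => y.1.1 == 0) with
      | some p => some p
      | none => some ((1, s), v) := by
  induction xs with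
  | nil => rfl
  | cons y t ih =>
      obtain ⟨⟨h01, hs⟩, hlt, hch⟩ : ((y.1.1 = 0 ∨ y.1.1 = 1) ∧ s < y.1.2) ∧ _ :=
        ⟨hbound y (by simp), List.pairwise_cons.1 hchain⟩
      rcases h01 with h0 | h1
      · -- head is tier 0: it wins immediately and for good
        have hstep : pvF (some ((1, s), v)) y = some y := by
          simp only [pvF]; rw [if_pos (by omega)]
        rw [List.foldl_cons, hstep, List.find?_cons_of_pos (by simp [h0])]
        exact pvF_keep t y (by
          intro z hz
          have hzb := hbound z (by simp [hz])
          have hzi := hlt z hz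
          rcases hzb.1 with hz0 | hz1 <;> omega)
      · -- head is tier 1 at a larger index: candidate kept, recurse
        have hstep : pvF (some ((1, s), v)) y = some ((1, s), v) := by
          simp only [pvF]; rw [if_neg (by omega)]
        rw [List.foldl_cons, hstep, List.find?_cons_of_neg (by simp [h1])]
        exact ih (fun z hz => hbound z (by simp [hz])) hch

-- the scored list is strictly increasing in its index component
theorem pvScored_chain (nameL : String) (l : List (String × String)) (s : Int) :
    (pvScored nameL l s).Pairwise (fun p q => p.1.2 < q.1.2) := by
  induction l generalizing s with
  | nil => simp [pvScored]
  | cons kv rest ih =>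
      obtain ⟨k, v⟩ := kv
      rw [pvScored_cons]
      by_cases hin : PySem.Chars.isIn k.toList nameL.toList = true
      · rw [if_pos hin]
        exact List.pairwise_cons.2
          ⟨fun z hz => by
             have := (pvScored_bound nameL rest (s + 1) z hz).2; simp only []; omega,
           ih (s + 1)⟩
      · rw [if_neg hin]; exact ih (s + 1)

-- the first tier-0 element of the scored list is A's first prefix match
theorem find0_eq_firstPre (nameL : String) (l : List (String × String)) (s : Int) :
    (pvScored nameL l s).find? (fun y => y.1.1 == 0) = pvFirstPre nameL l s := by
  induction l generalizing s with
  | nil => simp [pvScored, pvFirstPre]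
  | cons kv rest ih =>
      obtain ⟨k, v⟩ := kv
      rw [pvScored_cons]
      by_cases hin : PySem.Chars.isIn k.toList nameL.toList = true
      · rw [if_pos hin]
        by_cases hsw : PySem.Chars.startswith nameL.toList k.toList = true
        · rw [if_pos hsw, List.find?_cons_of_pos (by simp)]
          simp [pvFirstPre, hsw]
        · rw [if_neg hsw, List.find?_cons_of_neg (by simp)]
          simp [pvFirstPre, hsw, ih]
      · have hsw : ¬ PySem.Chars.startswith nameL.toList k.toList = true :=
          fun h => hin (startswith_isIn _ _ h)
        rw [if_neg hin]
        simp [pvFirstPre, hsw, ih]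

-- the min-fold over the scored list = first prefix match, else first substring match
theorem min_scored_eq (nameL : String) (l : List (String × String)) (s : Int) :
    (pvScored nameL l s).foldl pvF none =
      match pvFirstPre nameL l s with
      | some p => some p
      | none => pvFirstSub nameL l s := by
  induction l generalizing s with
  | nil => simp [pvScored, pvFirstPre, pvFirstSub]
  | cons kv rest ih =>
      obtain ⟨k, v⟩ := kv
      rw [pvScored_cons]
      by_cases hin : PySem.Chars.isIn k.toList nameL.toList = true
      · rw [if_pos hin]
        by_cases hsw : PySem.Chars.startswith nameL.toList k.toList = true
        · -- prefix match at the head: both sides return it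
          rw [if_pos hsw, List.foldl_cons]
          have h0 : pvF none (((0 : Int), s), v) = some (((0 : Int), s), v) := rfl
          rw [h0, pvF_keep _ _ (by
            intro z hz
            have hzb := pvScored_bound nameL rest (s + 1) z hz
            show ¬ (z.1.1 < (0 : Int) ∨ (z.1.1 ≤ 0 ∧ z.1.2 < s))
            rcases hzb.1 with hz0 | hz1 <;> omega)]
          simp [pvFirstPre, hsw]
        · -- substring-only match at the head
          rw [if_neg hsw, List.foldl_cons]
          have h1 : pvF none (((1 : Int), s), v) = some (((1 : Int), s), v) := rfl
          rw [h1, pvF_tier1 _ s v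
              (fun z hz => by
                have := pvScored_bound nameL rest (s + 1) z hz
                exact ⟨this.1, by omega⟩)
              (pvScored_chain nameL rest (s + 1)),
            find0_eq_firstPre]
          cases h : pvFirstPre nameL rest (s + 1) <;>
            simp [pvFirstPre, pvFirstSub, hsw, hin, h]
      · -- no match at the head: skip on both sides
        have hsw : ¬ PySem.Chars.startswith nameL.toList k.toList = true :=
          fun h => hin (startswith_isIn _ _ h)
        rw [if_neg hin, ih]
        simp [pvFirstPre, pvFirstSub, hsw, hin]

-- A's loops are the value components of the tagged first matches
theorem loopPrefix_eq (nameL : String) (l : List (String × String)) (s : Int) :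
    pvLoopPrefix nameL l = (pvFirstPre nameL l s).map (·.2) := by
  induction l generalizing s with
  | nil => rfl
  | cons kv rest ih =>
      obtain ⟨k, v⟩ := kv
      by_cases hsw : PySem.Chars.startswith nameL.toList k.toList = true <;>
        simp [pvLoopPrefix, pvFirstPre, hsw, ih (s + 1)]

theorem loopSub_eq (nameL : String) (l : List (String × String)) (s : Int) :
    pvLoopSub nameL l = (pvFirstSub nameL l s).map (·.2) := by
  induction l generalizing s with
  | nil => rfl
  | cons kv rest ih =>
      obtain ⟨k, v⟩ := kv
      by_cases hin : PySem.Chars.isIn k.toList nameL.toList = true <;>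
        simp [pvLoopSub, pvFirstSub, hin, ih (s + 1)]

-- ===== VERDICT (by name: the statement is the Claim_ definition above) =====
set_option maxRecDepth 10000 in
set_option maxHeartbeats 2000000 in
theorem map_name_to_program_id_spec : Claim_equal_map_name_to_program_id := by
  intro name _
  unfold Spec_map_name_to_program_id
  show (match pvLoopPrefix (PySem.Str.lower name) pvProgramNameMap with
        | some v => some v
        | none => pvLoopSub (PySem.Str.lower name) pvProgramNameMap) =
       (match PySem.List.min2? (pvScored (PySem.Str.lower name) pvEntries 0)
              (fun t => t.1.1) (fun t => t.1.2) with
        | some t => some t.2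
        | none => none)
  rw [pvEntries_eq, min2?_eq_foldl, min_scored_eq _ _ 0,
    loopPrefix_eq _ _ 0, loopSub_eq _ _ 0]
  cases pvFirstPre (PySem.Str.lower name) pvProgramNameMap 0 with
  | none => cases pvFirstSub (PySem.Str.lower name) pvProgramNameMap 0 <;> rfl
  | some p => rfl
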